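-- pv_equiv track=rewrite | github.com/MaratAG/GB_Pythons_Algoritms | les_3_task_9.py | get_min_items_of_columns
-- ===== SOURCE A (Python) =====
-- def get_min_items_of_columns(matrix):
--     """ Получаем индексы минимальных элементов столбцов."""
--     min_items_of_columns = {}
--     for j in range(SIZE_COLUMNS):
--         min_element = matrix[0][j]
--         min_indexes = (0, j)
--         for i in range(1, SIZE_ROWS):
--             if matrix[i][j] < min_element:
--                 min_element = matrix[i][j]
--                 min_indexes = (i, j)
--         if min_element in min_items_of_columns.keys():
--             min_items_of_columns[min_element].append(min_indexes)
--         else: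
--             min_items_of_columns[min_element] = [min_indexes]
--
--     return min_items_of_columns
--
-- SIZE_ROWS = 5
--
-- SIZE_COLUMNS = 4
-- ===== SOURCE B (Python) =====
-- SIZE_ROWS = 5
--
-- SIZE_COLUMNS = 4
--
--
-- def get_min_items_of_columns(matrix):
--     """Row-major single pass with per-column champion accumulators."""
--     min_element = [matrix[0][j] for j in range(SIZE_COLUMNS)]
--     min_index = [(0, j) for j in range(SIZE_COLUMNS)]
--     for i in range(1, SIZE_ROWS):
--         row = matrix[i]
--         for j in range(SIZE_COLUMNS):
--             if row[j] < min_element[j]: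
--                 min_element[j] = row[j]
--                 min_index[j] = (i, j)
--     result = {}
--     for j in range(SIZE_COLUMNS):
--         result.setdefault(min_element[j], []).append(min_index[j])
--     return result
-- ===== Notes on version B (the rewrite author's own statement) =====
-- stated objective: alternative
-- what changed: Replaces A's column-major nested scan (recompute the minimum per column, updating the dict inside the column loop) by a single row-major pass over per-column champion accumulator arrays followed by a separate column-order grouping stage.
import Mathlib
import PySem

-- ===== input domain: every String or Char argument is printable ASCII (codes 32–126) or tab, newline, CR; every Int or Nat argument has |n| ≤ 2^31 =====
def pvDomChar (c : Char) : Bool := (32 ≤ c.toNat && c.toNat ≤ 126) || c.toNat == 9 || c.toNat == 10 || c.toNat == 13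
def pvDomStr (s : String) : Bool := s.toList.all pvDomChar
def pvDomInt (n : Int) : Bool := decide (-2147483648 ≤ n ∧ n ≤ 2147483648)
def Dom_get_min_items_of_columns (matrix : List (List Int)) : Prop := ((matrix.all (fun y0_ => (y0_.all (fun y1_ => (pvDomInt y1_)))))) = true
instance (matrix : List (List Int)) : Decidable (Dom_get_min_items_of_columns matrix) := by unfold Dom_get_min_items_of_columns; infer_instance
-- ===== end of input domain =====

-- B replaces A's column-major nested scan by a single row-major pass over per-column
-- champion accumulators (same cost; objective: alternative decomposition).


-- ===== PORT A =====
-- literal transliteration of A: for each column j, scan rows 1..4 keeping (min_element, min_indexes),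
-- then append (or create) the dict entry; the dict is returned (as its items list).
def get_min_items_of_columns (matrix : List (List Int)) : List (Int × List (Int × Int)) :=
  ((PySem.List.pyRange 0 4 1).foldl (fun (d : PySem.Dict Int (List (Int × Int))) j =>
      let st := (PySem.List.pyRange 1 5 1).foldl (fun (st : Int × (Int × Int)) i =>
          if PySem.List.pyGetD (PySem.List.pyGetD matrix i []) j 0 < st.1 then
            (PySem.List.pyGetD (PySem.List.pyGetD matrix i []) j 0, (i, j))
          else st)
        (PySem.List.pyGetD (PySem.List.pyGetD matrix 0 []) j 0, (0, j))
      if d.contains st.1 then d.insert st.1 (d.getD st.1 [] ++ [st.2])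
      else d.insert st.1 [st.2])
    PySem.Dict.empty).items

-- ===== PORT B =====
-- literal transliteration of B: per-column accumulator lists min_element / min_index,
-- one row-major pass, then grouping in column order.
-- 'result.setdefault(k, []).append(v)' is ported as 'd.modify k [] (· ++ [v])' (exact:
-- setdefault returns the entry's list, append extends it in place).
def get_min_items_of_columns_alt (matrix : List (List Int)) : List (Int × List (Int × Int)) :=
  let minEl0 := (PySem.List.pyRange 0 4 1).map (fun j =>
      PySem.List.pyGetD (PySem.List.pyGetD matrix 0 []) j 0)
  let minIdx0 := (PySem.List.pyRange 0 4 1).map (fun j => ((0 : Int), j))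
  let fin := (PySem.List.pyRange 1 5 1).foldl (fun (st : List Int × List (Int × Int)) i =>
      let row := PySem.List.pyGetD matrix i []
      (PySem.List.pyRange 0 4 1).foldl (fun (st : List Int × List (Int × Int)) j =>
          if PySem.List.pyGetD row j 0 < PySem.List.pyGetD st.1 j 0 then
            (PySem.List.pySetD st.1 j (PySem.List.pyGetD row j 0),
             PySem.List.pySetD st.2 j (i, j))
          else st)
        st)
    (minEl0, minIdx0)
  ((PySem.List.pyRange 0 4 1).foldl (fun (d : PySem.Dict Int (List (Int × Int))) j =>
      d.modify (PySem.List.pyGetD fin.1 j 0) [] (· ++ [PySem.List.pyGetD fin.2 j (0, 0)]))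
    PySem.Dict.empty).items

-- ===== PRECONDITION & SPEC =====
-- Pre_ excludes exactly the inputs on which the Python A raises IndexError:
-- fewer than SIZE_ROWS = 5 rows, or one of the first 5 rows shorter than SIZE_COLUMNS = 4.
def Pre_get_min_items_of_columns (matrix : List (List Int)) : Prop :=
  5 ≤ matrix.length ∧ ∀ row ∈ matrix.take 5, 4 ≤ row.length
instance (matrix : List (List Int)) : Decidable (Pre_get_min_items_of_columns matrix) := by
  unfold Pre_get_min_items_of_columns; infer_instance
def pvWitness_get_min_items_of_columns : List (List Int) :=
  [[1, 2, 3, 4], [5, 6, 7, 8], [0, 1, 2, 3], [9, 9, 9, 9], [2, 2, 2, 2]]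
def Spec_get_min_items_of_columns (matrix : List (List Int)) (out : List (Int × List (Int × Int))) : Prop := out = get_min_items_of_columns_alt matrix
instance (matrix : List (List Int)) (out : List (Int × List (Int × Int))) : Decidable (Spec_get_min_items_of_columns matrix out) := by unfold Spec_get_min_items_of_columns; infer_instance

-- ===== CLAIM (what is proved, stated in full; the proofs are below) =====
def Claim_equal_get_min_items_of_columns : Prop := ∀ (matrix : List (List Int)), Dom_get_min_items_of_columns matrix → Pre_get_min_items_of_columns matrix → Spec_get_min_items_of_columns matrix (get_min_items_of_columns matrix)

-- ===== LEMMAS AND PROOFS =====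

-- matrix[i][j] as the ports read it
def gm (m : List (List Int)) (i j : Int) : Int :=
  PySem.List.pyGetD (PySem.List.pyGetD m i []) j 0

-- the per-column champion after rows 0..k (value ek, index pk)
def e0 (m : List (List Int)) (j : Int) : Int := gm m 0 j
def e1 (m : List (List Int)) (j : Int) : Int := if gm m 1 j < e0 m j then gm m 1 j else e0 m j
def e2 (m : List (List Int)) (j : Int) : Int := if gm m 2 j < e1 m j then gm m 2 j else e1 m j
def e3 (m : List (List Int)) (j : Int) : Int := if gm m 3 j < e2 m j then gm m 3 j else e2 m j
def e4 (m : List (List Int)) (j : Int) : Int := if gm m 4 j < e3 m j then gm m 4 j else e3 m j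
def p0 (_m : List (List Int)) (j : Int) : Int × Int := ((0 : Int), j)
def p1 (m : List (List Int)) (j : Int) : Int × Int := if gm m 1 j < e0 m j then ((1 : Int), j) else p0 m j
def p2 (m : List (List Int)) (j : Int) : Int × Int := if gm m 2 j < e1 m j then ((2 : Int), j) else p1 m j
def p3 (m : List (List Int)) (j : Int) : Int × Int := if gm m 3 j < e2 m j then ((3 : Int), j) else p2 m j
def p4 (m : List (List Int)) (j : Int) : Int × Int := if gm m 4 j < e3 m j then ((4 : Int), j) else p3 m j

-- B's outer-fold body (definitionally the lambda in the port, row let inlined)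
def bstep (m : List (List Int)) (st : List Int × List (Int × Int)) (i : Int) :
    List Int × List (Int × Int) :=
  (PySem.List.pyRange 0 4 1).foldl (fun (st : List Int × List (Int × Int)) j =>
      if PySem.List.pyGetD (PySem.List.pyGetD m i []) j 0 < PySem.List.pyGetD st.1 j 0 then
        (PySem.List.pySetD st.1 j (PySem.List.pyGetD (PySem.List.pyGetD m i []) j 0),
         PySem.List.pySetD st.2 j (i, j))
      else st)
    st

-- B's row-major pass and grouping stage, as named pieces of the port
def finB (m : List (List Int)) : List Int × List (Int × Int) :=
  (PySem.List.pyRange 1 5 1).foldl (bstep m)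
    ((PySem.List.pyRange 0 4 1).map (fun j =>
        PySem.List.pyGetD (PySem.List.pyGetD m 0 []) j 0),
     (PySem.List.pyRange 0 4 1).map (fun j => ((0 : Int), j)))

def groupB (fin : List Int × List (Int × Int)) : List (Int × List (Int × Int)) :=
  ((PySem.List.pyRange 0 4 1).foldl (fun (d : PySem.Dict Int (List (Int × Int))) j =>
      d.modify (PySem.List.pyGetD fin.1 j 0) [] (· ++ [PySem.List.pyGetD fin.2 j (0, 0)]))
    PySem.Dict.empty).items

theorem pyGetD4_0 {α : Type} (a b c d e : α) : PySem.List.pyGetD [a, b, c, d] 0 e = a := rfl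
theorem pyGetD4_1 {α : Type} (a b c d e : α) : PySem.List.pyGetD [a, b, c, d] 1 e = b := rfl
theorem pyGetD4_2 {α : Type} (a b c d e : α) : PySem.List.pyGetD [a, b, c, d] 2 e = c := rfl
theorem pyGetD4_3 {α : Type} (a b c d e : α) : PySem.List.pyGetD [a, b, c, d] 3 e = d := rfl
theorem pySetD4_0 {α : Type} (a b c d v : α) : PySem.List.pySetD [a, b, c, d] 0 v = [v, b, c, d] := rfl
theorem pySetD4_1 {α : Type} (a b c d v : α) : PySem.List.pySetD [a, b, c, d] 1 v = [a, v, c, d] := rfl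
theorem pySetD4_2 {α : Type} (a b c d v : α) : PySem.List.pySetD [a, b, c, d] 2 v = [a, b, v, d] := rfl
theorem pySetD4_3 {α : Type} (a b c d v : α) : PySem.List.pySetD [a, b, c, d] 3 v = [a, b, c, v] := rfl

theorem fst_ite {α β : Type} (c : Prop) [Decidable c] (a b : α × β) :
    (ite c a b).1 = ite c a.1 b.1 := apply_ite Prod.fst c a b
theorem snd_ite {α β : Type} (c : Prop) [Decidable c] (a b : α × β) :
    (ite c a b).2 = ite c a.2 b.2 := apply_ite Prod.snd c a b
theorem pyGetD_ite {α : Type} (c : Prop) [Decidable c] (l l' : List α) (i : Int) (d : α) :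
    PySem.List.pyGetD (ite c l l') i d = ite c (PySem.List.pyGetD l i d) (PySem.List.pyGetD l' i d) :=
  apply_ite (fun t => PySem.List.pyGetD t i d) c l l'
theorem pySetD_ite {α : Type} (c : Prop) [Decidable c] (l l' : List α) (i : Int) (v : α) :
    PySem.List.pySetD (ite c l l') i v = ite c (PySem.List.pySetD l i v) (PySem.List.pySetD l' i v) :=
  apply_ite (fun t => PySem.List.pySetD t i v) c l l'

theorem range04 : PySem.List.pyRange 0 4 1 = [0, 1, 2, 3] := by decide
theorem range15 : PySem.List.pyRange 1 5 1 = [1, 2, 3, 4] := by decide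

-- A's append-or-create branch is exactly Dict.modify with default [].
theorem modify_eq_branch (d : PySem.Dict Int (List (Int × Int))) (k : Int) (v : Int × Int) :
    d.modify k [] (· ++ [v]) =
      if d.contains k then d.insert k (d.getD k [] ++ [v]) else d.insert k [v] := by
  by_cases h : d.contains k
  · simp [PySem.Dict.modify, h]
  · have h' : d.contains k = false := by simpa using h
    simp [PySem.Dict.modify, PySem.Dict.getD_of_not_contains d [] h', h']

-- one row of B's pass updates the four accumulators pointwise
theorem bstep_spec (m : List (List Int)) (i x0 x1 x2 x3 : Int) (q0 q1 q2 q3 : Int × Int) :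
    bstep m ([x0, x1, x2, x3], [q0, q1, q2, q3]) i =
      ([if gm m i 0 < x0 then gm m i 0 else x0,
        if gm m i 1 < x1 then gm m i 1 else x1,
        if gm m i 2 < x2 then gm m i 2 else x2,
        if gm m i 3 < x3 then gm m i 3 else x3],
       [if gm m i 0 < x0 then (i, (0 : Int)) else q0,
        if gm m i 1 < x1 then (i, (1 : Int)) else q1,
        if gm m i 2 < x2 then (i, (2 : Int)) else q2,
        if gm m i 3 < x3 then (i, (3 : Int)) else q3]) := by
  unfold bstep gm
  rw [range04]
  simp only [List.foldl_cons, List.foldl_nil, fst_ite, snd_ite, pyGetD_ite, pySetD_ite,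
    pyGetD4_0, pyGetD4_1, pyGetD4_2, pyGetD4_3,
    pySetD4_0, pySetD4_1, pySetD4_2, pySetD4_3, ite_self]
  split_ifs <;> rfl

-- A's inner column scan computes the same champion pair
theorem colA_eq (m : List (List Int)) (j : Int) :
    List.foldl (fun (st : Int × (Int × Int)) i =>
        if PySem.List.pyGetD (PySem.List.pyGetD m i []) j 0 < st.1 then
          (PySem.List.pyGetD (PySem.List.pyGetD m i []) j 0, (i, j))
        else st)
      (PySem.List.pyGetD (PySem.List.pyGetD m 0 []) j 0, (0, j)) [1, 2, 3, 4]
      = (e4 m j, p4 m j) := by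
  simp only [List.foldl_cons, List.foldl_nil]
  unfold e4 p4 e3 p3 e2 p2 e1 p1 e0 p0 gm
  split_ifs <;> rfl

-- B's whole row-major pass, computed
theorem finB_eq (m : List (List Int)) :
    finB m = ([e4 m 0, e4 m 1, e4 m 2, e4 m 3], [p4 m 0, p4 m 1, p4 m 2, p4 m 3]) := by
  unfold finB
  rw [range04, range15]
  simp only [List.map_cons, List.map_nil, List.foldl_cons, List.foldl_nil]
  rw [bstep_spec, bstep_spec, bstep_spec, bstep_spec]
  rfl

-- ===== VERDICT (by name: the statement is the Claim_ definition above) =====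
theorem get_min_items_of_columns_spec : Claim_equal_get_min_items_of_columns := by
  intro m _ _
  show get_min_items_of_columns m = get_min_items_of_columns_alt m
  have hB : get_min_items_of_columns_alt m = groupB (finB m) := rfl
  rw [hB, finB_eq]
  unfold get_min_items_of_columns groupB
  rw [range15]
  simp only [colA_eq]
  rw [range04]
  simp only [List.foldl_cons, List.foldl_nil, modify_eq_branch,
    pyGetD4_0, pyGetD4_1, pyGetD4_2, pyGetD4_3]
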